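-- pv_equiv track=rewrite | github.com/falah-sutawindaya/15-solver | final.py | generatemove
-- ===== SOURCE A (Python) =====
-- def generatemove(soal):
--     move = {
--         0:[1,4], 1:[0,2,5], 2:[1,3,6], 3:[2,7],
--         4:[0,5,8], 5:[1,4,6,9], 6:[2,5,7,10], 7:[3,6,11],
--         8:[4,9,12], 9:[5,8,10,13], 10:[6,9,11,14], 11:[7,10,15],
--         12:[8,13], 13:[9,12,14], 14:[10,13,15], 15:[11,14]
--     }
--     salah = []
--     for i in soal:
--         for j in i:
--             salah.append(int(j))
--     return move[salah.index(0)]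
-- ===== SOURCE B (Python) =====
-- def generatemove(soal):
--     flat = [int(j) for i in soal for j in i]
--     pos = flat.index(0)
--     row, col = divmod(pos, 4)
--     res = []
--     if row > 0:
--         res.append(pos - 4)
--     if col > 0:
--         res.append(pos - 1)
--     if col < 3:
--         res.append(pos + 1)
--     if row < 3:
--         res.append(pos + 4)
--     return res
-- ===== Notes on version B (the rewrite author's own statement) =====
-- stated objective: idiomatic
-- what changed: B replaces A's 16-entry hardcoded neighbour lookup table by computing neighbours arithmetically from divmod(pos, 4) with four boundary guards.
import Mathlib
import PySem

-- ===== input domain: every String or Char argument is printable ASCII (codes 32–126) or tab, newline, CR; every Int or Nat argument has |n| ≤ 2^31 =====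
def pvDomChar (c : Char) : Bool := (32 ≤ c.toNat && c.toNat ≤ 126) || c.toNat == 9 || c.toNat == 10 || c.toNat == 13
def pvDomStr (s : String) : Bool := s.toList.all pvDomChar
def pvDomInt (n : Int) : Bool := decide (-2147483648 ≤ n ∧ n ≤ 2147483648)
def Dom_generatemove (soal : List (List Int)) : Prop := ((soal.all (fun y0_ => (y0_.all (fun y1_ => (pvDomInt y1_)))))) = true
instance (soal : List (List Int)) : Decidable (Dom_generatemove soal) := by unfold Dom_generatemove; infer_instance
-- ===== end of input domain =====

-- B computes neighbours from divmod(pos,4) instead of A's lookup table (idiomatic; return value only, no mutation).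

-- ===== PORT A =====
def generatemove (soal : List (List Int)) : List Int :=
  let move : PySem.Dict Int (List Int) := PySem.Dict.ofList
    [(0,[1,4]), (1,[0,2,5]), (2,[1,3,6]), (3,[2,7]),
     (4,[0,5,8]), (5,[1,4,6,9]), (6,[2,5,7,10]), (7,[3,6,11]),
     (8,[4,9,12]), (9,[5,8,10,13]), (10,[6,9,11,14]), (11,[7,10,15]),
     (12,[8,13]), (13,[9,12,14]), (14,[10,13,15]), (15,[11,14])]
  let salah : List Int := soal.foldl (fun acc i => i.foldl (fun acc2 j => acc2 ++ [j]) acc) []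
  match PySem.List.index? salah 0 with
  | some idx => ((move.get? (idx : Int)).getD [])   -- none cases (ValueError / KeyError) excluded by Pre_
  | none => []

-- ===== PORT B =====
def generatemove_alt (soal : List (List Int)) : List Int :=
  let flat : List Int := soal.flatMap (fun i => i.map (fun j => j))
  match PySem.List.index? flat 0 with
  | some p =>   -- none case (ValueError) excluded by Pre_
    let pos : Int := (p : Int)
    let row := PySem.Int.floordiv pos 4
    let col := PySem.Int.mod pos 4
    (if row > 0 then [pos - 4] else []) ++ (if col > 0 then [pos - 1] else []) ++
      (if col < 3 then [pos + 1] else []) ++ (if row < 3 then [pos + 4] else [])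
  | none => []

-- ===== PRECONDITION & SPEC =====
-- Pre_ excludes inputs where A raises: no 0 in the flattened grid (ValueError), or the first 0 at flattened index ≥ 16 (KeyError).
def Pre_generatemove (soal : List (List Int)) : Prop :=
  (0 : Int) ∈ (soal.flatMap (fun i => i)).take 16
instance (soal : List (List Int)) : Decidable (Pre_generatemove soal) := by unfold Pre_generatemove; infer_instance
def pvWitness_generatemove : List (List Int) := [[1, 0], [2, 3]]

def Spec_generatemove (soal : List (List Int)) (out : List Int) : Prop := out = generatemove_alt soal
instance (soal : List (List Int)) (out : List Int) : Decidable (Spec_generatemove soal out) := by unfold Spec_generatemove; infer_instance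

-- ===== CLAIM (what is proved, stated in full; the proofs are below) =====
def Claim_equal_generatemove : Prop := ∀ (soal : List (List Int)), Dom_generatemove soal → Pre_generatemove soal → Spec_generatemove soal (generatemove soal)
-- ===== LEMMAS AND PROOFS =====

-- A's append loop over one row
lemma inner_foldl (i : List Int) (acc : List Int) :
    i.foldl (fun acc2 j => acc2 ++ [j]) acc = acc ++ i := by
  induction i generalizing acc with
  | nil => simp
  | cons x xs ih => simp [List.foldl, ih]

-- A's nested append loop flattens the grid
lemma salah_eq (soal : List (List Int)) (acc : List Int) :
    soal.foldl (fun acc i => i.foldl (fun acc2 j => acc2 ++ [j]) acc) acc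
      = acc ++ soal.flatMap (fun i => i) := by
  induction soal generalizing acc with
  | nil => simp
  | cons r rs ih =>
    rw [List.foldl_cons, inner_foldl, ih]
    simp

-- membership in the first n elements bounds the first index
lemma index_lt_of_mem_take (l : List Int) (v : Int) (n : Nat) (h : v ∈ l.take n) :
    ∃ p, PySem.List.index? l v = some p ∧ p < n := by
  simp only [PySem.List.index?_eq_idxOf?]
  induction l generalizing n with
  | nil => simp at h
  | cons x xs ih =>
    cases n with
    | zero => simp at h
    | succ m =>
      by_cases hx : x = v
      · exact ⟨0, by simp [List.idxOf?_cons, hx], by omega⟩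
      · rcases (by simpa using h : v = x ∨ v ∈ List.take m xs) with h1 | h1
        · exact absurd h1.symm hx
        · obtain ⟨p, hp, hpn⟩ := ih m h1
          exact ⟨p + 1, by simp [List.idxOf?_cons, hx, hp], by omega⟩

-- table lookup equals the arithmetic neighbour list, for each position 0..15
lemma table_eq_arith (p : Nat) (hp : p < 16) :
    ((PySem.Dict.ofList
      [((0:Int),[(1:Int),4]), (1,[0,2,5]), (2,[1,3,6]), (3,[2,7]),
       (4,[0,5,8]), (5,[1,4,6,9]), (6,[2,5,7,10]), (7,[3,6,11]),
       (8,[4,9,12]), (9,[5,8,10,13]), (10,[6,9,11,14]), (11,[7,10,15]),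
       (12,[8,13]), (13,[9,12,14]), (14,[10,13,15]), (15,[11,14])]).get? (p : Int)).getD []
    = ((if PySem.Int.floordiv (p : Int) 4 > 0 then [(p : Int) - 4] else []) ++
       (if PySem.Int.mod (p : Int) 4 > 0 then [(p : Int) - 1] else []) ++
       (if PySem.Int.mod (p : Int) 4 < 3 then [(p : Int) + 1] else []) ++
       (if PySem.Int.floordiv (p : Int) 4 < 3 then [(p : Int) + 4] else [])) := by
  interval_cases p <;> decide

-- ===== VERDICT (by name: the statement is the Claim_ definition above) =====
theorem generatemove_spec : Claim_equal_generatemove := by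
  intro soal _hdom hpre
  unfold Spec_generatemove generatemove generatemove_alt
  have hflat : soal.flatMap (fun i => i.map (fun j => j)) = soal.flatMap (fun i => i) := by simp
  obtain ⟨p, hp, hpn⟩ := index_lt_of_mem_take (soal.flatMap (fun i => i)) 0 16 hpre
  simp only [salah_eq, List.nil_append, hflat, hp]
  exact table_eq_arith p hpn
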